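-- pv_equiv track=rewrite | github.com/Tanukium/excel2csv | project/converter/excel2csv.py | remove_blank_cell_at_row_start
-- ===== SOURCE A (Python) =====
-- def transpose_sheet(sheet):
--     """
--     x行y列のsheetを, y行x列のsheetに変換してtransposed_sheetとして返す.
--     """
--     row_num, col_num = len(sheet), len(sheet[0])
--     transposed_sheet = []
--     for i in range(col_num):
--         temp = []
--         for row in sheet:
--             temp.append(row[i])
--         transposed_sheet.append(temp)
--     return transposed_sheet
--
-- def count_blank_cell_at_row_start(transposed_sheet):
--     """
--     transposed_sheet(list: -> list -> str)の要素(list)に対し,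
--     連続何行が中の要素が全て*''*になる(つまり, 列がからっぽ)ことを計算し, その結果をintとして返す.
--     結果がtransposed_sheetの長さ(つまり, sheetの列数)と一致すれば,
--     sheetがからっぽに判定し, -1を返す.
--     """
--     count = 0
--     for col in transposed_sheet:
--         if any(col):
--             break
--         count += 1
--     if count == len(transposed_sheet):
--         return -1
--     else:
--         return count
--
-- def remove_blank_cell_at_row_start(sheet):
--     """
--     sheetのrowの始まりに存在する空っぽセル('')を削除して,
--     new_sheetとして返す.
--     """
--     new_sheet = []
--     transposed_sheet = transpose_sheet(sheet)
--     count = count_blank_cell_at_row_start(transposed_sheet)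
--     if count != -1:
--         for row in sheet:
--             new_sheet.append(row[count:])
--     else:
--         for row in sheet:
--             new_sheet.append(row)
--     return new_sheet
-- ===== SOURCE B (Python) =====
-- def remove_blank_cell_at_row_start(sheet):
--     """Strip leading all-blank columns, scanning columns in place (no transpose)."""
--     col_num = len(sheet[0])
--     count = 0
--     while count < col_num and all(not row[count] for row in sheet):
--         count += 1
--     if count == col_num:
--         return [row for row in sheet]
--     return [row[count:] for row in sheet]
-- ===== Notes on version B (the rewrite author's own statement) =====
-- stated objective: faster
-- what changed: Drops the transpose pass entirely: a single while loop probes each leading column directly (with an early stop at the first non-blank column) instead of materialising the whole transposed sheet and then scanning its rows.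
import Mathlib
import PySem

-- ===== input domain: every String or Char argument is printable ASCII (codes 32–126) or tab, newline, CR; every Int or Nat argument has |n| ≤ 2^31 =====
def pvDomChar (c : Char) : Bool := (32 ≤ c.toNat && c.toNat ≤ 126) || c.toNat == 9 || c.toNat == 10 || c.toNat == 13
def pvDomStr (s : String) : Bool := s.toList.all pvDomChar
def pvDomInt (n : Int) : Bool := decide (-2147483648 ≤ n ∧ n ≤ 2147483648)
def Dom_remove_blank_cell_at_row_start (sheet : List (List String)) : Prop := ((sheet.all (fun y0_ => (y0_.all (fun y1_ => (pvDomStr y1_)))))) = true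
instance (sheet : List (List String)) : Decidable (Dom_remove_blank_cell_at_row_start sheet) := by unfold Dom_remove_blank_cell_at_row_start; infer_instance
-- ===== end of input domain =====

-- B drops A's transpose pass: one while loop probes leading columns in place with an
-- early stop at the first non-blank column, then slices the rows once.


-- ===== PORT A =====
-- transpose_sheet: builds the y-by-x transposed sheet cell by cell (row[i] → pyGet?, default
-- only reachable outside Pre_, where the Python raises IndexError).
def transpose_sheet (sheet : List (List String)) : List (List String) :=
  let col_num : Nat := ((PySem.List.pyGet? sheet 0).getD []).length
  (List.range col_num).foldl
    (fun acc (i : Nat) =>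
      acc ++ [sheet.foldl (fun temp row => temp ++ [(PySem.List.pyGet? row (i : Int)).getD ""]) []])
    []

-- the 'for col in …: if any(col): break; count += 1' loop (any(col) = some cell non-empty)
def countBlankLoop : List (List String) → Int → Int
  | [], count => count
  | col :: rest, count =>
      if col.any (fun s => !(s == "")) then count else countBlankLoop rest (count + 1)

def count_blank_cell_at_row_start (transposed_sheet : List (List String)) : Int :=
  let count := countBlankLoop transposed_sheet 0
  if count = (transposed_sheet.length : Int) then -1 else count

def remove_blank_cell_at_row_start (sheet : List (List String)) : List (List String) :=
  let transposed_sheet := transpose_sheet sheet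
  let count := count_blank_cell_at_row_start transposed_sheet
  if count ≠ -1 then
    sheet.foldl (fun new_sheet row => new_sheet ++ [PySem.List.slice row (some count) none]) []
  else
    sheet.foldl (fun new_sheet row => new_sheet ++ [row]) []

-- ===== PORT B =====
-- all(not row[count] for row in sheet): the count-th column is entirely blank
def blankCol (sheet : List (List String)) (count : Nat) : Bool :=
  sheet.all (fun row => ((PySem.List.pyGet? row (count : Int)).getD "") == "")

-- the while loop; fuel = col_num - count makes 'count < col_num' structural
def scanBlank (sheet : List (List String)) : Nat → Nat → Nat
  | 0, count => count
  | fuel + 1, count => if blankCol sheet count then scanBlank sheet fuel (count + 1) else count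

def remove_blank_cell_at_row_start_alt (sheet : List (List String)) : List (List String) :=
  let col_num : Nat := ((PySem.List.pyGet? sheet 0).getD []).length
  let count := scanBlank sheet col_num 0
  if count = col_num then sheet.map (fun row => row)
  else sheet.map (fun row => PySem.List.slice row (some (count : Int)) none)

-- ===== PRECONDITION & SPEC =====
-- Pre_ excludes exactly the inputs where the Python A raises IndexError: the empty sheet
-- (sheet[0]) and ragged sheets with a row shorter than the first row (row[i] in transpose).
def Pre_remove_blank_cell_at_row_start (sheet : List (List String)) : Prop :=
  sheet ≠ [] ∧ ∀ row ∈ sheet, (sheet.headD []).length ≤ row.length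
instance (sheet : List (List String)) : Decidable (Pre_remove_blank_cell_at_row_start sheet) := by
  unfold Pre_remove_blank_cell_at_row_start; infer_instance

def pvWitness_remove_blank_cell_at_row_start : List (List String) := [["", "a"], ["", "b"]]

def Spec_remove_blank_cell_at_row_start (sheet : List (List String)) (out : List (List String)) : Prop := out = remove_blank_cell_at_row_start_alt sheet
instance (sheet : List (List String)) (out : List (List String)) : Decidable (Spec_remove_blank_cell_at_row_start sheet out) := by unfold Spec_remove_blank_cell_at_row_start; infer_instance

-- ===== CLAIM (what is proved, stated in full; the proofs are below) =====
def Claim_equal_remove_blank_cell_at_row_start : Prop := ∀ (sheet : List (List String)), Dom_remove_blank_cell_at_row_start sheet → Pre_remove_blank_cell_at_row_start sheet → Spec_remove_blank_cell_at_row_start sheet (remove_blank_cell_at_row_start sheet)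

-- ===== LEMMAS AND PROOFS =====

-- the i-th column of the sheet, as transpose_sheet materialises it
def colOf (sheet : List (List String)) (i : Nat) : List String :=
  sheet.map (fun row => (PySem.List.pyGet? row (i : Int)).getD "")

theorem transpose_eq_map_colOf (sheet : List (List String)) :
    transpose_sheet sheet =
      (List.range ((PySem.List.pyGet? sheet 0).getD []).length).map (colOf sheet) := by
  unfold transpose_sheet colOf
  simp only [PySem.List.foldl_append_singleton_eq_map, List.nil_append]

theorem any_colOf (sheet : List (List String)) (i : Nat) :
    ((colOf sheet i).any (fun s => !(s == ""))) = !(blankCol sheet i) := by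
  unfold colOf blankCol
  rw [List.any_map, List.not_all_eq_any_not]
  rfl

theorem countBlankLoop_range' (sheet : List (List String)) (n c : Nat) :
    countBlankLoop ((List.range' c n).map (colOf sheet)) (c : Int) =
      ((scanBlank sheet n c : Nat) : Int) := by
  induction n generalizing c with
  | zero => simp [countBlankLoop, scanBlank]
  | succ n ih =>
      rw [List.range'_succ]
      simp only [List.map_cons, countBlankLoop, scanBlank, any_colOf]
      cases h : blankCol sheet c with
      | false => simp
      | true =>
          simp only [Bool.not_true, Bool.false_eq_true, if_false, if_true]
          have := ih (c + 1)
          push_cast at this ⊢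
          exact this

theorem countLoop_eq_scan (sheet : List (List String)) :
    countBlankLoop (transpose_sheet sheet) 0 =
      ((scanBlank sheet ((PySem.List.pyGet? sheet 0).getD []).length 0 : Nat) : Int) := by
  rw [transpose_eq_map_colOf, List.range_eq_range']
  exact_mod_cast countBlankLoop_range' sheet _ 0

-- ===== VERDICT (by name: the statement is the Claim_ definition above) =====
theorem remove_blank_cell_at_row_start_spec : Claim_equal_remove_blank_cell_at_row_start := by
  intro sheet _ _
  show remove_blank_cell_at_row_start sheet = remove_blank_cell_at_row_start_alt sheet
  simp only [remove_blank_cell_at_row_start, count_blank_cell_at_row_start,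
    remove_blank_cell_at_row_start_alt]
  rw [countLoop_eq_scan]
  have hlen : (transpose_sheet sheet).length
      = ((PySem.List.pyGet? sheet 0).getD []).length := by
    rw [transpose_eq_map_colOf]; simp
  set col_num := ((PySem.List.pyGet? sheet 0).getD []).length with hcol
  set k := scanBlank sheet col_num 0 with hk
  rw [hlen]
  by_cases hkc : k = col_num
  · have h1 : ((k : Int) = (col_num : Int)) := by exact_mod_cast hkc
    rw [if_pos h1, if_neg (by simp), if_pos hkc]
    exact (PySem.List.foldl_append_singleton_eq_map (fun (row : List String) => row) sheet
      []).trans (List.nil_append _)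
  · have h1 : ¬ ((k : Int) = (col_num : Int)) := by exact_mod_cast hkc
    rw [if_neg h1, if_pos (by omega), if_neg hkc]
    exact (PySem.List.foldl_append_singleton_eq_map
      (fun (row : List String) => PySem.List.slice row (some (k : Int)) none) sheet
      []).trans (List.nil_append _)
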